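-- pv_equiv track=rewrite | github.com/sNoDliD/master1.1 | algebra_automatic_methods/lab1/hopcroft.py | update_states
-- ===== SOURCE A (Python) =====
-- def update_states(P: list, states: list, begin):
--     final_states = set()
--     begin_state = begin
--
--     for i, s in enumerate(P):
--         if set(s).intersection(states):
--             final_states.add(i)
--         if begin in s:
--             begin_state = i
--
--     return list(final_states), begin_state
-- ===== SOURCE B (Python) =====
-- def update_states(P: list, states: list, begin):
--     # inverted index: element -> list of partition indices containing it (in order)
--     pairs = [(x, i) for i, s in enumerate(P) for x in s]
--     index = {}
--     for x, i in pairs: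
--         index.setdefault(x, []).append(i)
--     hit = [False] * len(P)
--     for st in states:
--         for i in index.get(st, ()):
--             hit[i] = True
--     final_states = {i for i, h in enumerate(hit) if h}
--     lst = index.get(begin, [])
--     begin_state = lst[-1] if lst else begin
--     return list(final_states), begin_state
-- ===== Notes on version B (the rewrite author's own statement) =====
-- stated objective: faster
-- what changed: A builds a throwaway set per partition and intersects it with the states list on every iteration; B builds one inverted index (element -> partition indices) once and derives the hit set via a mark array and the begin state via the index's last entry for begin.
import Mathlib
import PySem

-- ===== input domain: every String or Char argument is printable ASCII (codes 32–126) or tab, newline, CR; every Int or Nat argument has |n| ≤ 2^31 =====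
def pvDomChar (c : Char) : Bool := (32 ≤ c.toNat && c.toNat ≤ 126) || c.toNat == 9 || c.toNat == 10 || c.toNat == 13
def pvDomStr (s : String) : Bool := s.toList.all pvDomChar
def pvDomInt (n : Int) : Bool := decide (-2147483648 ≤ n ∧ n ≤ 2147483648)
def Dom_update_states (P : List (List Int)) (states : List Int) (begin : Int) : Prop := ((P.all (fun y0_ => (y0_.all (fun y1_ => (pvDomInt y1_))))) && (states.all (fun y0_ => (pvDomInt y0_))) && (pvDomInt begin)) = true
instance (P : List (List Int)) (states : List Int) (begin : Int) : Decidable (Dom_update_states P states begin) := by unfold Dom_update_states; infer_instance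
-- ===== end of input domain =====

-- B replaces A's per-partition temporary set + intersection test by one inverted index
-- (element -> partition indices) with a mark array; same return value (alternative decomposition).

-- ===== PORT A =====
-- Both Pythons return list(final_states) where final_states is a CPython set of the partition
-- indices (non-negative ints, added in increasing order).  That list is in CPython's hash-table
-- iteration order, which PySem does not model, so the set is ported BY HAND as an exact
-- step-for-step model of CPython's setobject.c (open addressing, 9 linear probes, perturb
-- probing, growth at fill*5 >= mask*3): exact for the keys these ports insert (ints >= 0;
-- cpyHash is CPython's int hash for n >= 0).  A's port models it with a struct carrying the
-- fill/used counters and a recursive probe loop (fuel only to be total; an empty slot always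
-- exists since fill < size, so the fuel is never exhausted).

structure CPySet where
  table : List (Option Int)
  fill : Nat
  used : Nat

def cpyHash (n : Int) : Nat := n.toNat % 2305843009213693951

def cpyScan (table : List (Option Int)) (key : Int) (i : Nat) : Nat → Nat → Option (Option Nat)
  | _, 0 => none
  | j, Nat.succ cnt =>
    match table.getD (i + j) none with
    | none => some (some (i + j))
    | some k => if k = key then some none else cpyScan table key i (j + 1) cnt

def cpyProbe (table : List (Option Int)) (mask : Nat) (key : Int) : Nat → Nat → Nat → Option Nat
  | _, _, 0 => none
  | i, perturb, Nat.succ fuel =>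
    match table.getD i none with
    | none => some i
    | some k =>
      if k = key then none
      else
        match (if i + 9 ≤ mask then cpyScan table key i 1 9 else none) with
        | some r => r
        | none =>
          let p' := perturb >>> 5
          cpyProbe table mask key ((i * 5 + 1 + p') % (mask + 1)) p' fuel

def cpySetSlot (s : CPySet) (key : Int) (slot : Nat) : CPySet :=
  ⟨s.table.set slot (some key), s.fill + 1, s.used + 1⟩

def cpyNewSizeAux (minused : Nat) : Nat → Nat → Nat
  | sz, 0 => sz
  | sz, Nat.succ f => if sz ≤ minused then cpyNewSizeAux minused (sz * 2) f else sz

def cpyInsertClean (s : CPySet) (key : Int) : CPySet :=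
  let mask := s.table.length - 1
  match cpyProbe s.table mask key (cpyHash key % (mask + 1)) (cpyHash key) (s.table.length * 10 + 100) with
  | some slot => cpySetSlot s key slot
  | none => s

def cpyResize (s : CPySet) (minused : Nat) : CPySet :=
  let ns := cpyNewSizeAux minused 8 64
  (s.table.filterMap id).foldl cpyInsertClean ⟨List.replicate ns none, 0, 0⟩

def cpyAdd (s : CPySet) (key : Int) : CPySet :=
  let mask := s.table.length - 1
  match cpyProbe s.table mask key (cpyHash key % (mask + 1)) (cpyHash key) (s.table.length * 10 + 100) with
  | some slot =>
    let s' := cpySetSlot s key slot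
    if s'.fill * 5 ≥ mask * 3 then cpyResize s' (if s'.used > 50000 then s'.used * 2 else s'.used * 4) else s'
  | none => s

def cpyEmpty : CPySet := ⟨List.replicate 8 none, 0, 0⟩
def cpyList (s : CPySet) : List Int := s.table.filterMap id

-- for i, s in enumerate(P): add i to final_states if set(s).intersection(states) nonempty; begin_state := i if begin in s
def update_states (P : List (List Int)) (states : List Int) (begin : Int) : List Int × Int :=
  let r := (PySem.List.enumerate P).foldl
    (fun (acc : CPySet × Int) p =>
      (if PySem.Set.inter (PySem.Set.ofList p.2) states ≠ [] then cpyAdd acc.1 p.1 else acc.1,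
       if begin ∈ p.2 then p.1 else acc.2))
    (cpyEmpty, begin)
  (cpyList r.1, r.2)

-- ===== PORT B =====
-- B's port models the same CPython set (for the set comprehension / list(final_states) in Source B)
-- with its OWN formulation: the state is the bare slot table (fill = used = number of occupied
-- slots, no counters), the probe is a generated candidate-slot sequence searched with find?,
-- and the resize size is the first power of two exceeding the threshold, again via find?.
-- Exact for the keys this port inserts (distinct ints >= 0), proved equivalent to A's model below.

def hitB (tbl : List (Option Int)) (xk : Int) (sl : Nat) : Bool :=
  match tbl.getD sl none with
  | none => true
  | some xe => xe == xk

def slotSeq (msk : Nat) : Nat → Nat → Nat → List Nat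
  | _, _, 0 => []
  | ci, pb, Nat.succ fl =>
    (ci :: (if ci + 9 ≤ msk then (List.range 9).map (fun dc => ci + 1 + dc) else []))
      ++ slotSeq msk ((ci * 5 + 1 + (pb >>> 5)) % (msk + 1)) (pb >>> 5) fl

def findB (tbl : List (Option Int)) (xk : Int) : Option Nat :=
  let msk := tbl.length - 1
  match (slotSeq msk (cpyHash xk % (msk + 1)) (cpyHash xk) (tbl.length * 10 + 100)).find? (hitB tbl xk) with
  | some sl => if tbl.getD sl none = none then some sl else none
  | none => none

def sizeB (uu : Nat) : Nat :=
  (((List.range 64).map (fun g => 8 <<< g)).find?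
      (fun sz => decide ((if uu > 50000 then uu * 2 else uu * 4) < sz))).getD (8 <<< 64)

def insB (tbl : List (Option Int)) (xk : Int) : List (Option Int) :=
  match findB tbl xk with
  | some sl => tbl.set sl (some xk)
  | none => tbl

def addB (tbl : List (Option Int)) (xk : Int) : List (Option Int) :=
  match findB tbl xk with
  | none => tbl
  | some sl =>
    let t2 := tbl.set sl (some xk)
    let nn := (t2.filterMap id).length
    if nn * 5 ≥ (tbl.length - 1) * 3 then (t2.filterMap id).foldl insB (List.replicate (sizeB nn) none)
    else t2

def update_states_alt (P : List (List Int)) (states : List Int) (begin : Int) : List Int × Int :=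
  -- pairs = [(x, i) for i, s in enumerate(P) for x in s]
  let pairs := (PySem.List.enumerate P).flatMap (fun e => e.2.map (fun xe => (xe, e.1)))
  -- for x, i in pairs: index.setdefault(x, []).append(i)
  let index := pairs.foldl (fun dc pq => dc.modify pq.1 [] (fun l => l ++ [pq.2])) (PySem.Dict.empty : PySem.Dict Int (List Int))
  -- hit = [False]*len(P); for st in states: for i in index.get(st, ()): hit[i] = True
  let hit := states.foldl (fun hb sv => (index.getD sv []).foldl (fun hb ci => PySem.List.pySetD hb ci true) hb)
    (List.replicate P.length false)
  -- final_states = {i for i, h in enumerate(hit) if h}  (Source B's set built with B's table model)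
  let final := (PySem.List.enumerate hit).foldl
    (fun (tb : List (Option Int)) e => if e.2 then addB tb e.1 else tb) (List.replicate 8 none)
  -- lst = index.get(begin, []); begin_state = lst[-1] if lst else begin
  let lst := index.getD begin []
  (final.filterMap id, if lst ≠ [] then PySem.List.pyGetD lst (-1) begin else begin)

-- ===== PRECONDITION & SPEC =====
def Spec_update_states (P : List (List Int)) (states : List Int) (begin : Int) (out : List Int × Int) : Prop := out = update_states_alt P states begin
instance (P : List (List Int)) (states : List Int) (begin : Int) (out : List Int × Int) : Decidable (Spec_update_states P states begin out) := by unfold Spec_update_states; infer_instance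

-- ===== CLAIM (what is proved, stated in full; the proofs are below) =====
def Claim_equal_update_states : Prop := ∀ (P : List (List Int)) (states : List Int) (begin : Int), Dom_update_states P states begin → Spec_update_states P states begin (update_states P states begin)

-- ===== LEMMAS AND PROOFS =====

-- ---- correspondence of the two CPython-set models ----

theorem scan_eq (t : List (Option Int)) (k : Int) (i : Nat) : ∀ (cnt j : Nat),
    cpyScan t k i j cnt
      = match ((List.range cnt).map (fun d => i + j + d)).find? (hitB t k) with
        | none => none
        | some q => if t.getD q none = none then some (some q) else some none := by
  intro cnt
  induction cnt with
  | zero => intro j; simp [cpyScan]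
  | succ n ih =>
    intro j
    have hrange : (List.range (n + 1)).map (fun d => i + j + d)
        = (i + j) :: (List.range n).map (fun d => i + (j + 1) + d) := by
      rw [List.range_succ_eq_map, List.map_cons, List.map_map]
      refine congrArg₂ _ (by omega) (List.map_congr_left ?_)
      intro d _
      simp only [Function.comp_apply]
      omega
    rw [hrange]
    cases h : t.getD (i + j) none with
    | none =>
      have hh : hitB t k (i + j) = true := by unfold hitB; rw [h]
      rw [List.find?_cons_of_pos hh]
      simp only [cpyScan]
      rw [h]
      simp
    | some x =>
      by_cases hx : x = k
      · have hh : hitB t k (i + j) = true := by unfold hitB; rw [h]; simp [hx]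
        rw [List.find?_cons_of_pos hh]
        simp only [cpyScan]
        rw [h]
        simp [hx]
      · have hh : hitB t k (i + j) = false := by unfold hitB; rw [h]; simp [hx]
        rw [List.find?_cons_of_neg (by simp [hh])]
        have hstep : cpyScan t k i j (n + 1) = cpyScan t k i (j + 1) n := by
          simp only [cpyScan]
          rw [h]
          simp [hx]
        rw [hstep]
        exact ih (j + 1)

theorem probe_eq (t : List (Option Int)) (m : Nat) (k : Int) : ∀ (fuel i p : Nat),
    cpyProbe t m k i p fuel
      = match (slotSeq m i p fuel).find? (hitB t k) with
        | none => none
        | some q => if t.getD q none = none then some q else none := by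
  intro fuel
  induction fuel with
  | zero => intro i p; simp [cpyProbe, slotSeq]
  | succ n ih =>
    intro i p
    have hseq : slotSeq m i p (n + 1)
        = i :: ((if i + 9 ≤ m then (List.range 9).map (fun d => i + 1 + d) else [])
            ++ slotSeq m ((i * 5 + 1 + (p >>> 5)) % (m + 1)) (p >>> 5) n) := by
      simp [slotSeq]
    rw [hseq]
    cases h : t.getD i none with
    | none =>
      have hh : hitB t k i = true := by unfold hitB; rw [h]
      rw [List.find?_cons_of_pos hh]
      simp only [cpyProbe]
      rw [h]
      simp
    | some x =>
      by_cases hx : x = k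
      · have hh : hitB t k i = true := by unfold hitB; rw [h]; simp [hx]
        rw [List.find?_cons_of_pos hh]
        simp only [cpyProbe]
        rw [h]
        simp [hx]
      · have hh : hitB t k i = false := by unfold hitB; rw [h]; simp [hx]
        rw [List.find?_cons_of_neg (by simp [hh]), List.find?_append]
        have hstep : cpyProbe t m k i p (n + 1)
            = match (if i + 9 ≤ m then cpyScan t k i 1 9 else none) with
              | some r => r
              | none => cpyProbe t m k ((i * 5 + 1 + (p >>> 5)) % (m + 1)) (p >>> 5) n := by
          simp only [cpyProbe]
          rw [h]
          simp [hx]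
        rw [hstep]
        by_cases hm : i + 9 ≤ m
        · rw [if_pos hm, if_pos hm, scan_eq t k i 9 1]
          cases hf : ((List.range 9).map (fun d => i + 1 + d)).find? (hitB t k) with
          | none => simp only [Option.none_or]; exact ih _ _
          | some q =>
            simp only [Option.some_or]
            by_cases hq : t.getD q none = none
            · rw [if_pos hq, if_pos hq]
            · rw [if_neg hq, if_neg hq]
        · rw [if_neg hm, if_neg hm]
          simp only [List.find?_nil, Option.none_or]
          exact ih _ _

theorem findB_eq (t : List (Option Int)) (k : Int) :
    cpyProbe t (t.length - 1) k (cpyHash k % (t.length - 1 + 1)) (cpyHash k) (t.length * 10 + 100)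
      = findB t k := by
  rw [probe_eq]
  unfold findB
  cases hf : (slotSeq (t.length - 1) (cpyHash k % (t.length - 1 + 1)) (cpyHash k)
      (t.length * 10 + 100)).find? (hitB t k) <;> simp [hf]

theorem findB_isEmpty (t : List (Option Int)) (k : Int) (j : Nat) (h : findB t k = some j) :
    t.getD j none = none := by
  unfold findB at h
  dsimp only at h
  split at h
  · split at h
    · cases h; assumption
    · cases h
  · cases h

theorem mem_slotSeq (m : Nat) : ∀ (fuel i p j : Nat), i < m + 1 → j ∈ slotSeq m i p fuel → j < m + 1 := by
  intro fuel
  induction fuel with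
  | zero => intro i p j _ hj; simp [slotSeq] at hj
  | succ n ih =>
    intro i p j hi hj
    simp only [slotSeq, List.cons_append, List.mem_cons, List.mem_append] at hj
    rcases hj with rfl | hj | hj
    · exact hi
    · by_cases hm : i + 9 ≤ m
      · rw [if_pos hm] at hj
        obtain ⟨d, hd, rfl⟩ := List.mem_map.1 hj
        simp only [List.mem_range] at hd
        omega
      · rw [if_neg hm] at hj
        simp at hj
    · exact ih _ _ _ (Nat.mod_lt _ (by omega)) hj

theorem findB_lt (t : List (Option Int)) (k : Int) (j : Nat) (hl : 1 ≤ t.length)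
    (h : findB t k = some j) : j < t.length := by
  have hmem : j ∈ slotSeq (t.length - 1) (cpyHash k % (t.length - 1 + 1)) (cpyHash k)
      (t.length * 10 + 100) := by
    unfold findB at h
    dsimp only at h
    split at h
    · split at h
      · cases h
        exact List.mem_of_find?_eq_some (by assumption)
      · cases h
    · cases h
  have := mem_slotSeq (t.length - 1) _ _ _ _ (Nat.mod_lt _ (by omega)) hmem
  omega

theorem newsize_aux_eq (m : Nat) : ∀ (f sz : Nat),
    cpyNewSizeAux m sz f
      = (((List.range f).map (fun kk => sz <<< kk)).find? (fun v => decide (m < v))).getD (sz <<< f) := by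
  intro f
  induction f with
  | zero => intro sz; simp [cpyNewSizeAux]
  | succ n ih =>
    intro sz
    have hmap : (List.range (n + 1)).map (fun kk => sz <<< kk)
        = sz :: (List.range n).map (fun kk => (sz * 2) <<< kk) := by
      rw [List.range_succ_eq_map, List.map_cons, List.map_map]
      refine congrArg₂ _ (by simp) (List.map_congr_left ?_)
      intro d _
      simp only [Function.comp_apply, Nat.shiftLeft_eq, pow_succ]
      ring
    rw [hmap]
    by_cases hle : sz ≤ m
    · rw [List.find?_cons_of_neg (by simp; omega)]
      have hdef : sz <<< (n + 1) = (sz * 2) <<< n := by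
        simp only [Nat.shiftLeft_eq, pow_succ]
        ring
      rw [hdef, show cpyNewSizeAux m sz (n + 1) = cpyNewSizeAux m (sz * 2) n from by
        simp [cpyNewSizeAux, hle]]
      exact ih (sz * 2)
    · rw [List.find?_cons_of_pos (by simp; omega)]
      simp [cpyNewSizeAux, hle]

theorem sizeB_eq (u : Nat) : cpyNewSizeAux (if u > 50000 then u * 2 else u * 4) 8 64 = sizeB u := by
  rw [newsize_aux_eq]
  rfl

theorem sizeB_pos (u : Nat) : 1 ≤ sizeB u := by
  unfold sizeB
  cases hf : ((List.range 64).map (fun k => 8 <<< k)).find?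
      (fun sz => decide ((if u > 50000 then u * 2 else u * 4) < sz)) with
  | none => simp [Option.getD]
  | some v =>
    have hv := List.mem_of_find?_eq_some hf
    obtain ⟨kk, _, rfl⟩ := List.mem_map.1 hv
    simp only [Option.getD_some, Nat.shiftLeft_eq]
    exact Nat.one_le_iff_ne_zero.2 (by positivity)

theorem filterMap_id_set_none {α : Type} (a : α) : ∀ (l : List (Option α)) (j : Nat),
    l.getD j none = none → j < l.length →
    ((l.set j (some a)).filterMap id).length = (l.filterMap id).length + 1 := by
  intro l
  induction l with
  | nil => intro j _ hlt; simp at hlt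
  | cons x xs ih =>
    intro j hget hlt
    cases j with
    | zero =>
      have hx : x = none := by simpa using hget
      subst hx
      simp
    | succ j =>
      have hget' : xs.getD j none = none := by simpa using hget
      have hlt' : j < xs.length := by simpa using hlt
      have h2 := ih j hget' hlt'
      simp only [Function.id_def] at h2
      cases x <;> simp <;> omega

def InvT (s : CPySet) : Prop :=
  s.fill = (s.table.filterMap id).length ∧ s.used = (s.table.filterMap id).length ∧ 1 ≤ s.table.length

theorem insertClean_corr (s : CPySet) (k : Int) (h : InvT s) :
    (cpyInsertClean s k).table = insB s.table k ∧ InvT (cpyInsertClean s k) := by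
  obtain ⟨h1, h2, h3⟩ := h
  unfold cpyInsertClean insB
  dsimp only
  rw [findB_eq]
  cases hf : findB s.table k with
  | none => exact ⟨rfl, h1, h2, h3⟩
  | some j =>
    have he := findB_isEmpty s.table k j hf
    have hj := findB_lt s.table k j h3 hf
    refine ⟨rfl, ?_, ?_, ?_⟩
    · simp only [cpySetSlot]
      rw [filterMap_id_set_none k s.table j he hj, h1]
    · simp only [cpySetSlot]
      rw [filterMap_id_set_none k s.table j he hj, h2]
    · simpa [cpySetSlot] using h3

theorem foldl_insertClean_corr (keys : List Int) : ∀ (s : CPySet), InvT s →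
    (keys.foldl cpyInsertClean s).table = keys.foldl insB s.table ∧ InvT (keys.foldl cpyInsertClean s) := by
  induction keys with
  | nil => exact fun s h => ⟨rfl, h⟩
  | cons k keys ih =>
    intro s h
    obtain ⟨ht, hi⟩ := insertClean_corr s k h
    simpa [List.foldl_cons, ht] using ih (cpyInsertClean s k) hi

theorem add_corr (s : CPySet) (k : Int) (h : InvT s) :
    (cpyAdd s k).table = addB s.table k ∧ InvT (cpyAdd s k) := by
  obtain ⟨h1, h2, h3⟩ := h
  unfold cpyAdd addB
  dsimp only
  rw [findB_eq]
  cases hf : findB s.table k with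
  | none => exact ⟨rfl, h1, h2, h3⟩
  | some j =>
    have he := findB_isEmpty s.table k j hf
    have hj := findB_lt s.table k j h3 hf
    have hn : ((s.table.set j (some k)).filterMap id).length = (s.table.filterMap id).length + 1 :=
      filterMap_id_set_none k s.table j he hj
    simp only [cpySetSlot]
    rw [h1, h2, ← hn]
    by_cases hres : ((s.table.set j (some k)).filterMap id).length * 5 ≥ (s.table.length - 1) * 3
    · rw [if_pos hres, if_pos hres]
      unfold cpyResize
      dsimp only
      rw [sizeB_eq]
      have hinit : InvT ⟨List.replicate (sizeB ((s.table.set j (some k)).filterMap id).length) none, 0, 0⟩ := by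
        refine ⟨?_, ?_, ?_⟩
        · simp
        · simp
        · simpa using sizeB_pos _
      exact foldl_insertClean_corr _ _ hinit
    · rw [if_neg hres, if_neg hres]
      refine ⟨rfl, rfl, rfl, by simpa using h3⟩

theorem fold_add_corr (keys : List Int) : ∀ (s : CPySet), InvT s →
    (keys.foldl cpyAdd s).table = keys.foldl addB s.table ∧ InvT (keys.foldl cpyAdd s) := by
  induction keys with
  | nil => exact fun s h => ⟨rfl, h⟩
  | cons k keys ih =>
    intro s h
    obtain ⟨ht, hi⟩ := add_corr s k h
    simpa [List.foldl_cons, ht] using ih (cpyAdd s k) hi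

theorem invT_empty : InvT cpyEmpty := by
  refine ⟨?_, ?_, ?_⟩ <;> simp [cpyEmpty]

-- ---- the two program folds produce the same key sequence / begin state ----

-- a guarded fold inserts exactly the filtered key sequence
theorem foldl_ite_insert {α σ : Type} (l : List (Int × α)) (c : Int × α → Prop) [DecidablePred c]
    (g : σ → Int → σ) (t0 : σ) :
    l.foldl (fun t p => if c p then g t p.1 else t) t0
      = (l.filterMap (fun p => if c p then some p.1 else none)).foldl g t0 := by
  induction l generalizing t0 with
  | nil => rfl
  | cons p l ih =>
    by_cases hc : c p
    · simp only [List.foldl_cons, List.filterMap_cons, if_pos hc, ih]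
    · simp only [List.foldl_cons, List.filterMap_cons, if_neg hc, ih]

theorem getLastD_append' {α : Type} (l1 l2 : List α) (b : α) :
    (l1 ++ l2).getLastD b = l2.getLastD (l1.getLastD b) := by
  cases h : l2.isEmpty
  · rw [List.isEmpty_eq_false_iff] at h
    rw [List.getLastD_eq_getLast?, List.getLast?_append_of_ne_nil _ h,
        List.getLastD_eq_getLast?]
    obtain ⟨y, hy⟩ := Option.isSome_iff_exists.1 (List.getLast?_isSome.2 h)
    simp [hy]
  · simp_all

theorem getLastD_map_const {α β : Type} (l : List α) (v : β) (b : β) :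
    (l.map (fun _ => v)).getLastD b = if l = [] then b else v := by
  cases l with
  | nil => simp
  | cons x xs =>
    simp only [List.map_cons, reduceCtorEq]
    induction xs generalizing x with
    | nil => simp
    | cons y ys ih => simpa using ih y

theorem block_getLastD (ys : List Int) (v b bg : Int) :
    ((((ys.map (fun x => (x, v))).filter (fun q => q.1 == bg)).map (fun q => q.2)).getLastD b)
      = if bg ∈ ys then v else b := by
  rw [List.filter_map, List.map_map]
  have h1 : ((fun q : Int × Int => q.2) ∘ (fun x => (x, v))) = (fun _ : Int => v) := rfl
  have h2 : ((fun q : Int × Int => q.1 == bg) ∘ (fun x => (x, v))) = (fun x : Int => x == bg) := rfl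
  rw [h1, h2, getLastD_map_const]
  by_cases hm : bg ∈ ys
  · rw [if_pos hm, if_neg]
    simp only [List.filter_eq_nil_iff]
    push Not
    exact ⟨bg, hm, by simp⟩
  · rw [if_neg hm, if_pos]
    rw [List.filter_eq_nil_iff]
    intro a ha
    simp only [beq_iff_eq]
    intro h; exact hm (h ▸ ha)

theorem beginA_eq (xs : List (List Int)) (s : Int) (b bg : Int) :
    (PySem.List.enumerate xs s).foldl (fun b (p : Int × List Int) => if bg ∈ p.2 then p.1 else b) b
      = ((((PySem.List.enumerate xs s).flatMap (fun (p : Int × List Int) => p.2.map (fun x => (x, p.1)))).filter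
          (fun q => q.1 == bg)).map (fun q => q.2)).getLastD b := by
  induction xs generalizing s b with
  | nil => simp [PySem.List.enumerate]
  | cons x xs ih =>
    rw [PySem.List.enumerate_cons]
    simp only [List.flatMap_cons, List.foldl_cons, List.filter_append, List.map_append]
    rw [getLastD_append', ih, block_getLastD]

-- L4: inner mark-array fold, elementwise
theorem markfold_getElem? (idxs : List Int) (h : List Bool) (j : Nat)
    (hin : ∀ i ∈ idxs, ∃ k : Nat, k < h.length ∧ i = (k : Int)) :
    (idxs.foldl (fun h i => PySem.List.pySetD h i true) h)[j]?
      = if (j : Int) ∈ idxs then some true else h[j]? := by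
  induction idxs generalizing h with
  | nil => simp
  | cons i idxs ih =>
    obtain ⟨k, hk, rfl⟩ := hin i (by simp)
    simp only [List.foldl_cons, PySem.List.pySetD_natCast]
    rw [ih _ (by intro i hi; obtain ⟨k', hk', rfl⟩ := hin i (by simp [hi]); exact ⟨k', by simpa using hk', rfl⟩)]
    by_cases hj : (j : Int) ∈ idxs
    · simp [hj]
    · simp only [hj, if_false, List.mem_cons, Int.natCast_inj]
      by_cases hjk : j = k
      · subst hjk
        simp [hk]
      · rw [List.getElem?_set_ne (Ne.symm hjk)]
        simp [hjk]

theorem markfold_length (idxs : List Int) (h : List Bool) :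
    (idxs.foldl (fun h i => PySem.List.pySetD h i true) h).length = h.length := by
  induction idxs generalizing h with
  | nil => rfl
  | cons i idxs ih =>
    simp only [List.foldl_cons]
    rw [ih, PySem.List.length_pySetD]

-- L5: outer fold over states
theorem statesfold_getElem? (states : List Int) (occf : Int → List Int) (h : List Bool) (j : Nat)
    (hin : ∀ st ∈ states, ∀ i ∈ occf st, ∃ k : Nat, k < h.length ∧ i = (k : Int)) :
    (states.foldl (fun h st => (occf st).foldl (fun h i => PySem.List.pySetD h i true) h) h)[j]?
      = if ∃ st ∈ states, (j : Int) ∈ occf st then some true else h[j]? := by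
  induction states generalizing h with
  | nil => simp
  | cons st states ih =>
    simp only [List.foldl_cons]
    rw [ih _ ?_, markfold_getElem? _ _ _ (hin st (by simp))]
    · by_cases h1 : ∃ s' ∈ states, (j : Int) ∈ occf s'
      · simp [h1]
      · by_cases h2 : (j : Int) ∈ occf st <;> simp [h1, h2]
    · intro s' hs' i hi
      obtain ⟨k, hk, rfl⟩ := hin s' (List.mem_cons_of_mem _ hs') i hi
      exact ⟨k, by rw [markfold_length]; exact hk, rfl⟩

-- L9: filterMap over enumerates of pointwise-equivalent lists
theorem filterMap_enumerate_congr {α β : Type} (xs : List α) (ys : List β) (s : Int)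
    (c1 : α → Prop) [DecidablePred c1] (c2 : β → Prop) [DecidablePred c2]
    (hlen : xs.length = ys.length)
    (hpt : ∀ k : Nat, (h1 : k < xs.length) → (h2 : k < ys.length) → (c1 xs[k] ↔ c2 ys[k])) :
    (PySem.List.enumerate xs s).filterMap (fun p => if c1 p.2 then some p.1 else none)
      = (PySem.List.enumerate ys s).filterMap (fun p => if c2 p.2 then some p.1 else none) := by
  induction xs generalizing ys s with
  | nil => cases ys with
    | nil => rfl
    | cons y ys => simp at hlen
  | cons x xs ih =>
    cases ys with
    | nil => simp at hlen
    | cons y ys =>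
      rw [PySem.List.enumerate_cons, PySem.List.enumerate_cons]
      simp only [List.filterMap_cons]
      have h0 : c1 x ↔ c2 y := hpt 0 (by simp) (by simp)
      have ht := ih ys (s + 1) (by simpa using hlen)
        (fun k h1 h2 => by simpa using hpt (k + 1) (by simpa using h1) (by simpa using h2))
      by_cases hc : c1 x
      · rw [if_pos hc, if_pos (h0.1 hc), ht]
      · rw [if_neg hc, if_neg (fun h => hc (h0.2 h)), ht]

theorem statesfold_length (states : List Int) (occf : Int → List Int) (h : List Bool) :
    (states.foldl (fun h st => (occf st).foldl (fun h i => PySem.List.pySetD h i true) h) h).length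
      = h.length := by
  induction states generalizing h with
  | nil => rfl
  | cons st states ih => simp only [List.foldl_cons]; rw [ih, markfold_length]

theorem getD_empty_nil (x : Int) : (PySem.Dict.empty : PySem.Dict Int (List Int)).getD x [] = [] := rfl

-- occ membership
theorem mem_occ (P : List (List Int)) (x i : Int) :
    i ∈ ((((PySem.List.enumerate P).flatMap
            (fun (p : Int × List Int) => p.2.map (fun z => (z, p.1)))).filter
          (fun q => q.1 == x)).map (fun q => q.2))
      ↔ ∃ (k : Nat) (hk : k < P.length), i = (k : Int) ∧ x ∈ P[k] := by
  simp only [List.mem_map, List.mem_filter, List.mem_flatMap, PySem.List.mem_enumerate_iff]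
  constructor
  · rintro ⟨q, ⟨⟨p, ⟨k, hk, rfl⟩, hq⟩, hx⟩, rfl⟩
    obtain ⟨z, hz, rfl⟩ := hq
    simp only [beq_iff_eq] at hx
    subst hx
    exact ⟨k, hk, by simp, hz⟩
  · rintro ⟨k, hk, rfl, hx⟩
    exact ⟨(x, (k : Int)), ⟨⟨((k : Int), P[k]), ⟨k, hk, by simp⟩, ⟨x, hx, rfl⟩⟩, by simp⟩, rfl⟩

theorem interNonempty (s states : List Int) :
    PySem.Set.inter (PySem.Set.ofList s) states ≠ [] ↔ ∃ x ∈ s, x ∈ states := by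
  rw [← List.isEmpty_eq_false_iff, List.isEmpty_eq_false_iff_exists_mem]
  constructor
  · rintro ⟨y, hy⟩
    have := (PySem.Set.mem_inter (PySem.Set.ofList s) states y).1 hy
    exact ⟨y, (PySem.Set.mem_ofList _ _).1 this.1, this.2⟩
  · rintro ⟨x, hx, hx'⟩
    exact ⟨x, (PySem.Set.mem_inter _ _ _).2 ⟨(PySem.Set.mem_ofList _ _).2 hx, hx'⟩⟩

theorem occ_eq (P : List (List Int)) (x : Int) :
    (((PySem.List.enumerate P).flatMap
        (fun (p : Int × List Int) => p.2.map (fun z => (z, p.1)))).foldl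
      (fun d q => d.modify q.1 [] (fun l => l ++ [q.2]))
      (PySem.Dict.empty : PySem.Dict Int (List Int))).getD x []
    = (((PySem.List.enumerate P).flatMap
          (fun (p : Int × List Int) => p.2.map (fun z => (z, p.1)))).filter
        (fun q => q.1 == x)).map (fun q => q.2) := by
  rw [PySem.Dict.getD_foldl_modify_append, getD_empty_nil]
  simp

theorem main_eq (P : List (List Int)) (states : List Int) (bg : Int) :
    update_states P states bg = update_states_alt P states bg := by
  unfold update_states update_states_alt
  rw [PySem.List.foldl_prod_mk
    (fun a (p : Int × List Int) => if PySem.Set.inter (PySem.Set.ofList p.2) states ≠ [] then cpyAdd a p.1 else a)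
    (fun b (p : Int × List Int) => if bg ∈ p.2 then p.1 else b)
    (PySem.List.enumerate P) cpyEmpty bg]
  refine Prod.ext ?_ ?_
  · -- final-states component: equal insertion sequences into the two equivalent set models
    simp only
    rw [foldl_ite_insert _ (fun p : Int × List Int => PySem.Set.inter (PySem.Set.ofList p.2) states ≠ []) cpyAdd cpyEmpty,
        foldl_ite_insert _ (fun p : Int × Bool => p.2 = true) addB (List.replicate 8 none)]
    have hlen : P.length = (states.foldl (fun h st =>
        (((((PySem.List.enumerate P).flatMap (fun p => p.2.map (fun x => (x, p.1)))).foldl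
            (fun d q => d.modify q.1 [] (fun l => l ++ [q.2]))
            (PySem.Dict.empty : PySem.Dict Int (List Int))).getD st []).foldl
          (fun h i => PySem.List.pySetD h i true) h))
        (List.replicate P.length false)).length := by
      rw [statesfold_length, List.length_replicate]
    have hseq := filterMap_enumerate_congr P _ 0
      (fun s => PySem.Set.inter (PySem.Set.ofList s) states ≠ [])
      (fun b => b = true) hlen ?_
    · rw [hseq]
      simpa [cpyList, cpyEmpty] using congrArg (List.filterMap id) (fold_add_corr _ cpyEmpty invT_empty).1
    intro k h1 h2
    have hin : ∀ st ∈ states, ∀ i ∈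
        ((((PySem.List.enumerate P).flatMap (fun p => p.2.map (fun x => (x, p.1)))).foldl
            (fun d q => d.modify q.1 [] (fun l => l ++ [q.2]))
            (PySem.Dict.empty : PySem.Dict Int (List Int))).getD st []),
        ∃ m : Nat, m < (List.replicate P.length false).length ∧ i = (m : Int) := by
      intro st _ i hi
      rw [occ_eq] at hi
      obtain ⟨m, hm, rfl, _⟩ := (mem_occ P st i).1 hi
      exact ⟨m, by simpa using hm, rfl⟩
    have hq := statesfold_getElem? states _ (List.replicate P.length false) k hin
    have hcond : (∃ st ∈ states, (k : Int) ∈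
        ((((PySem.List.enumerate P).flatMap (fun p => p.2.map (fun x => (x, p.1)))).foldl
            (fun d q => d.modify q.1 [] (fun l => l ++ [q.2]))
            (PySem.Dict.empty : PySem.Dict Int (List Int))).getD st []))
        ↔ ∃ x ∈ P[k], x ∈ states := by
      constructor
      · rintro ⟨st, hst, hmem⟩
        rw [occ_eq] at hmem
        obtain ⟨m, hm, hkm, hx⟩ := (mem_occ P st _).1 hmem
        have : m = k := by exact_mod_cast hkm.symm
        subst this
        exact ⟨st, hx, hst⟩
      · rintro ⟨x, hx, hxs⟩
        exact ⟨x, hxs, by rw [occ_eq]; exact (mem_occ P x _).2 ⟨k, h1, rfl, hx⟩⟩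
    have hget := List.getElem?_eq_getElem h2
    rw [hq] at hget
    have hrep : (List.replicate P.length false)[k]? = some false := by
      rw [List.getElem?_eq_getElem (by simpa using h1)]
      simp
    simp only
    rw [interNonempty]
    by_cases hc : ∃ st ∈ states, (k : Int) ∈
        ((((PySem.List.enumerate P).flatMap (fun p => p.2.map (fun x => (x, p.1)))).foldl
            (fun d q => d.modify q.1 [] (fun l => l ++ [q.2]))
            (PySem.Dict.empty : PySem.Dict Int (List Int))).getD st [])
    · rw [if_pos hc] at hget
      simp only [Option.some.injEq] at hget
      rw [← hget]
      simpa using hcond.1 hc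
    · rw [if_neg hc, hrep] at hget
      simp only [Option.some.injEq] at hget
      rw [← hget]
      simpa using fun h => hc (hcond.2 h)
  · -- begin-state component
    simp only
    rw [beginA_eq P 0 bg bg, occ_eq]
    by_cases hnil : (((PySem.List.enumerate P).flatMap
          (fun (p : Int × List Int) => p.2.map (fun z => (z, p.1)))).filter
        (fun q => q.1 == bg)).map (fun q => q.2) = []
    · rw [hnil]; simp
    · rw [if_pos hnil, PySem.List.pyGetD_neg_one _ _ hnil,
          List.getLastD_eq_getLast?, List.getLast?_eq_some_getLast hnil]
      rfl

-- ===== VERDICT (by name: the statement is the Claim_ definition above) =====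
theorem update_states_spec : Claim_equal_update_states := by
  intro P states bg _
  unfold Spec_update_states
  exact main_eq P states bg
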